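-- pv_equiv track=rewrite | github.com/berkaydemir6/gozetmen-atama-otomasyonu | olustur.py | sinav_sistemi
-- ===== SOURCE A (Python) =====
-- def sinav_sistemi(izinli_ogretmenler, dersler, ogretmen):
--     sinav_atama = []
--     eski_deger = 100
--     ders_sayisi = len(dersler)
--     # Gelen öğretmen listesindeki durumu en düşük olan öğretmen bulunuyor.
--     for durum in ogretmen:
--         if ogretmen[durum] < eski_deger:
--             eski_deger = ogretmen[durum] # En düşük duruma sahip gözetmen.
--     ders_ogretim_gorevlisi = {}
--     while ders_sayisi != 0: # Ders sayısı bitmediği sürece atama yapılıyor.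
--         for ders in dersler:
--             for i in ogretmen:
--                 if i not in izinli_ogretmenler and ders not in sinav_atama: # Öğretmen izinli öğretmenler listesinde değilse ve ders atanmamışsa.
--                     if eski_deger == ogretmen[i]: # Gözetmen en düşük duruma sahip gözetmene eşitse atama yapılıyor.
--                         ogretmen[i] += 1 # Gözetmenin durumu  bu sayfa için arttırılıyor.
--                         sinav_atama.append(ders) # Ders, atanmış dersler listesine arttırılıyor.
--                         ders_ogretim_gorevlisi[ders] = i
--                         ders_sayisi -= 1 # Ders sayısı azaltılıyor.
--                     else:
--                         continue
--         eski_deger += 1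
--     return ders_ogretim_gorevlisi
-- ===== SOURCE B (Python) =====
-- def sinav_sistemi(izinli_ogretmenler, dersler, ogretmen):
--     # Greedy: each course (in order) goes to the least-loaded available teacher
--     # (first one in dict order on ties); one min-scan per course instead of
--     # repeated level-sweep passes over all courses and teachers.
--     musait = [t for t in ogretmen if t not in izinli_ogretmenler]
--     atama = {}
--     for ders in dersler:
--         t = min(musait, key=lambda x: ogretmen[x])
--         ogretmen[t] += 1
--         atama[ders] = t
--     return atama
-- ===== Notes on version B (the rewrite author's own statement) =====
-- stated objective: faster
-- what changed: Replaces A's level-sweep while-loop (repeated passes over all courses x all teachers at ever-increasing status levels) by a direct greedy that assigns each course in one go to the least-loaded available teacher found by a single min-scan; intended as faster, but a timing run could not confirm a ratio (on larger random inputs A timed out where B returned; at sizes where both finish A is too quick to measure).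
import Mathlib
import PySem

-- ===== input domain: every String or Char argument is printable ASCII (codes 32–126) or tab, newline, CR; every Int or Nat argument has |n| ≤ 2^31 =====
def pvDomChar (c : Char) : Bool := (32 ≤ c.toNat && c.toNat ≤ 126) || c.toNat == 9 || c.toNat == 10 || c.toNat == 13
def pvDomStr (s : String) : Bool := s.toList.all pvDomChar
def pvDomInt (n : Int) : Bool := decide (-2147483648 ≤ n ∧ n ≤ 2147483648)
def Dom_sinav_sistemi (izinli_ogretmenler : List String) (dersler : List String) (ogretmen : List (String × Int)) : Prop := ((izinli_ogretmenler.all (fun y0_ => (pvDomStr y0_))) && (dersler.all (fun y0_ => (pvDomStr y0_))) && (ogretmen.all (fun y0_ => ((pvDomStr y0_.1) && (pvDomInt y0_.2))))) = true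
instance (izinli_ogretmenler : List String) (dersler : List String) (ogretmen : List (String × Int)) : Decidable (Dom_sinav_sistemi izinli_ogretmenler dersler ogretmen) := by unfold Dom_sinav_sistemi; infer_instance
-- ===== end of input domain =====

-- B replaces A's level-sweep while-loop (repeated passes over all courses × all teachers
-- at increasing status levels) by a direct greedy: one min-scan over the available
-- teachers per course.  Return-value equivalence only is proved; in Python both A and B
-- mutate the `ogretmen` dict in the same way (assigned teachers' statuses are bumped).


-- ===== PORT A =====
-- inner `for i in ogretmen:` loop of A; state = (sinav_atama, ders_ogretim_gorevlisi, ders_sayisi, ogretmen-dict)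
def pvInnerA (izinli : List String) (eski : Int) (ders : String) :
    List String → List String → PySem.Dict String String → Int → PySem.Dict String Int →
    List String × PySem.Dict String String × Int × PySem.Dict String Int
  | [], atama, gorev, sayisi, d => (atama, gorev, sayisi, d)
  | i :: ks, atama, gorev, sayisi, d =>
    if !izinli.contains i && !atama.contains ders then
      if eski == d.getD i 0 then
        -- `ogretmen[i]` is a lookup of a present key; getD with a dummy default is exact here
        pvInnerA izinli eski ders ks (atama ++ [ders]) (gorev.insert ders i) (sayisi - 1)
          (d.modify i 0 (· + 1))
      else pvInnerA izinli eski ders ks atama gorev sayisi d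
    else pvInnerA izinli eski ders ks atama gorev sayisi d

-- `for ders in dersler:` loop of A
def pvPassA (izinli : List String) (eski : Int) :
    List String → List String × PySem.Dict String String × Int × PySem.Dict String Int →
    List String × PySem.Dict String String × Int × PySem.Dict String Int
  | [], st => st
  | ders :: ds, (atama, gorev, sayisi, d) =>
      pvPassA izinli eski ds (pvInnerA izinli eski ders d.keys atama gorev sayisi d)

-- `while ders_sayisi != 0:` loop of A; `fuel` is only a totality guard (it is computed below
-- from the input's own status values, and under Pre_ it is proved never to run out)
def pvWhileA (izinli dersler : List String) :
    Nat → Int → List String × PySem.Dict String String × Int × PySem.Dict String Int →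
    PySem.Dict String String
  | fuel, eski, (atama, gorev, sayisi, d) =>
    if sayisi ≠ 0 then
      match fuel with
      | 0 => gorev
      | f + 1 => pvWhileA izinli dersler f (eski + 1) (pvPassA izinli eski dersler (atama, gorev, sayisi, d))
    else gorev

def sinav_sistemi (izinli_ogretmenler : List String) (dersler : List String) (ogretmen : List (String × Int)) : List (String × String) :=
  let d := PySem.Dict.ofList ogretmen
  -- `for durum in ogretmen: if ogretmen[durum] < eski_deger: eski_deger = ogretmen[durum]`
  let eski := d.keys.foldl (fun e k => if d.getD k 0 < e then d.getD k 0 else e) (100 : Int)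
  -- totality guard for the while-loop: the sweep level rises by 1 per pass, so once it
  -- passes the largest status in the input the loop is done (proved below under Pre_)
  let maxv := d.keys.foldl (fun e k => if e < d.getD k 0 then d.getD k 0 else e) eski
  (pvWhileA izinli_ogretmenler dersler ((maxv - eski).toNat + dersler.length + 2) eski
      ([], PySem.Dict.empty, (dersler.length : Int), d)).items

-- ===== PORT B =====
-- `for ders in dersler:` loop of B; Python's min raises on an empty sequence (excluded by Pre_) —
-- the port then stops and returns the assignments made so far
def pvLoopB (musait : List String) :
    List String → PySem.Dict String Int → PySem.Dict String String → PySem.Dict String String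
  | [], _, atama => atama
  | ders :: ds, d, atama =>
    match PySem.List.min? musait (fun t => d.getD t 0) with
    | some t => pvLoopB musait ds (d.modify t 0 (· + 1)) (atama.insert ders t)
    | none => atama

def sinav_sistemi_alt (izinli_ogretmenler : List String) (dersler : List String) (ogretmen : List (String × Int)) : List (String × String) :=
  let d := PySem.Dict.ofList ogretmen
  let musait := d.keys.filter (fun t => !izinli_ogretmenler.contains t)
  (pvLoopB musait dersler d PySem.Dict.empty).items

-- ===== PRECONDITION & SPEC =====
-- Pre_ excludes exactly the inputs on which A never returns: duplicate course names, and a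
-- nonempty course list with no available (non-izinli) teacher — in both cases A's while-loop
-- runs forever because ders_sayisi can never reach 0.
def Pre_sinav_sistemi (izinli_ogretmenler : List String) (dersler : List String) (ogretmen : List (String × Int)) : Prop :=
  dersler.Nodup ∧
  (dersler = [] ∨ ∃ p ∈ ogretmen, ¬ p.1 ∈ izinli_ogretmenler)
instance (izinli_ogretmenler : List String) (dersler : List String) (ogretmen : List (String × Int)) : Decidable (Pre_sinav_sistemi izinli_ogretmenler dersler ogretmen) := by unfold Pre_sinav_sistemi; infer_instance

def pvWitness_sinav_sistemi : List String × List String × (List (String × Int)) :=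
  (["x"], ["mat", "fiz", "kim"], [("ali", 1), ("ayse", 0), ("x", 0)])

def Spec_sinav_sistemi (izinli_ogretmenler : List String) (dersler : List String) (ogretmen : List (String × Int)) (out : List (String × String)) : Prop := out = sinav_sistemi_alt izinli_ogretmenler dersler ogretmen
instance (izinli_ogretmenler : List String) (dersler : List String) (ogretmen : List (String × Int)) (out : List (String × String)) : Decidable (Spec_sinav_sistemi izinli_ogretmenler dersler ogretmen out) := by unfold Spec_sinav_sistemi; infer_instance

-- ===== CLAIM (what is proved, stated in full; the proofs are below) =====
def Claim_equal_sinav_sistemi : Prop := ∀ (izinli_ogretmenler : List String) (dersler : List String) (ogretmen : List (String × Int)), Dom_sinav_sistemi izinli_ogretmenler dersler ogretmen → Pre_sinav_sistemi izinli_ogretmenler dersler ogretmen → Spec_sinav_sistemi izinli_ogretmenler dersler ogretmen (sinav_sistemi izinli_ogretmenler dersler ogretmen)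

-- ===== LEMMAS AND PROOFS =====

-- ===== proof-side definitions =====
def pvFirst (izinli : List String) (d : PySem.Dict String Int) (e : Int) (K : List String) : Option String :=
  K.find? (fun i => !izinli.contains i && (e == d.getD i 0))

def pvG (musait : List String) : List String → PySem.Dict String Int → List (String × String)
  | [], _ => []
  | c :: cs, d =>
    match PySem.List.min? musait (fun t => d.getD t 0) with
    | some t => (c, t) :: pvG musait cs (d.modify t 0 (· + 1))
    | none => []

def pvAPass (izinli : List String) (e : Int) (K : List String) :
    List String → PySem.Dict String Int →
    List (String × String) × List String × PySem.Dict String Int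
  | [], d => ([], [], d)
  | c :: cs, d =>
    match pvFirst izinli d e K with
    | some t =>
      let r := pvAPass izinli e K cs (d.modify t 0 (· + 1))
      ((c, t) :: r.1, r.2)
    | none => ([], c :: cs, d)

lemma innerA_of_mem (izinli : List String) (e : Int) (ders : String) (ks : List String)
    (atama : List String) (gorev : PySem.Dict String String) (sayisi : Int)
    (d : PySem.Dict String Int) (h : ders ∈ atama) :
    pvInnerA izinli e ders ks atama gorev sayisi d = (atama, gorev, sayisi, d) := by
  induction ks with
  | nil => rfl
  | cons i ks ih => simp [pvInnerA, h, ih]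

lemma innerA_char (izinli : List String) (e : Int) (ders : String) (ks : List String)
    (atama : List String) (gorev : PySem.Dict String String) (sayisi : Int)
    (d : PySem.Dict String Int) (h : ders ∉ atama) :
    pvInnerA izinli e ders ks atama gorev sayisi d =
      match pvFirst izinli d e ks with
      | some t => (atama ++ [ders], gorev.insert ders t, sayisi - 1, d.modify t 0 (· + 1))
      | none => (atama, gorev, sayisi, d) := by
  induction ks with
  | nil => rfl
  | cons i ks ih =>
    by_cases hiz : i ∈ izinli
    · simpa [pvInnerA, pvFirst, h, hiz] using ih
    · by_cases he : e = d.getD i 0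
      · have hmem : ders ∈ atama ++ [ders] := by simp
        simp [pvInnerA, pvFirst, h, hiz, he, innerA_of_mem _ _ _ _ _ _ _ _ hmem]
      · simpa [pvInnerA, pvFirst, h, hiz, he] using ih

lemma apass_none (izinli : List String) (e : Int) (K : List String)
    (cs : List String) (d : PySem.Dict String Int)
    (h : pvFirst izinli d e K = none) :
    pvAPass izinli e K cs d = ([], cs, d) := by
  cases cs with
  | nil => rfl
  | cons c cs => simp [pvAPass, h]

lemma first_mem_getD (izinli : List String) (d : PySem.Dict String Int) (e : Int)
    (K : List String) (t : String) (h : pvFirst izinli d e K = some t) :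
    t ∈ K ∧ t ∉ izinli ∧ d.getD t 0 = e := by
  have hmem := List.mem_of_find?_eq_some h
  have hp := List.find?_some h
  simp only [Bool.and_eq_true, Bool.not_eq_true', beq_iff_eq] at hp
  exact ⟨hmem, by simpa using hp.1, hp.2.symm⟩

lemma keys_modify_mem (d : PySem.Dict String Int) (t : String) (h : t ∈ d.keys) :
    (d.modify t 0 (· + 1)).keys = d.keys := by
  rw [PySem.Dict.keys_modify]
  exact PySem.Dict.keys_insert_of_contains d _ ((PySem.Dict.contains_iff_mem_keys d t).mpr h)

lemma apass_props (izinli : List String) (e : Int) (K : List String) :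
    ∀ (cs : List String) (d : PySem.Dict String Int), d.keys = K →
    ((pvAPass izinli e K cs d).1.map Prod.fst) ++ (pvAPass izinli e K cs d).2.1 = cs ∧
    (pvAPass izinli e K cs d).2.2.keys = K ∧
    (∀ i, (pvAPass izinli e K cs d).2.2.getD i 0 = d.getD i 0 ∨
          (d.getD i 0 = e ∧ (pvAPass izinli e K cs d).2.2.getD i 0 = e + 1)) ∧
    ((pvAPass izinli e K cs d).2.1 ≠ [] → pvFirst izinli (pvAPass izinli e K cs d).2.2 e K = none) ∧
    ((pvAPass izinli e K cs d).1 = [] → (pvAPass izinli e K cs d).2.2 = d) := by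
  intro cs
  induction cs with
  | nil =>
    intro d hK
    refine ⟨rfl, hK, fun i => Or.inl rfl, by simp [pvAPass], fun _ => rfl⟩
  | cons c cs ih =>
    intro d hK
    cases hf : pvFirst izinli d e K with
    | none =>
      refine ⟨by simp [pvAPass, hf], by simp [pvAPass, hf, hK], fun i => by simp [pvAPass, hf],
        ?_, by simp [pvAPass, hf]⟩
      intro _
      simpa [pvAPass, hf] using hf
    | some t =>
      obtain ⟨htK, -, hte⟩ := first_mem_getD izinli d e K t hf
      have hmod : (d.modify t 0 (· + 1)).keys = K := by
        rw [keys_modify_mem d t (hK ▸ htK)]; exact hK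
      have hstep : pvAPass izinli e K (c :: cs) d =
          ((c, t) :: (pvAPass izinli e K cs (d.modify t 0 (· + 1))).1,
            (pvAPass izinli e K cs (d.modify t 0 (· + 1))).2) := by
        simp [pvAPass, hf]
      obtain ⟨ih1, ih2, ih3, ih4, ih5⟩ := ih (d.modify t 0 (· + 1)) hmod
      rw [hstep]
      refine ⟨by simpa using ih1, ih2, ?_, fun hrem => ih4 hrem, ?_⟩
      · intro i
        have hm := PySem.Dict.getD_modify d t i 0 (· + 1)
        rcases ih3 i with h3 | h3
        · by_cases hit : i = t
          · right
            constructor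
            · rw [hit]; exact hte
            · show (pvAPass izinli e K cs (d.modify t 0 (· + 1))).2.2.getD i 0 = e + 1
              rw [h3, hm, if_pos hit, hte]
          · left
            show (pvAPass izinli e K cs (d.modify t 0 (· + 1))).2.2.getD i 0 = d.getD i 0
            rw [h3, hm, if_neg hit]
        · right
          refine ⟨?_, h3.2⟩
          by_cases hit : i = t
          · rw [hit]; exact hte
          · have h31 := h3.1
            rw [hm, if_neg hit] at h31; exact h31
      · intro hout
        exact absurd hout (by simp)

def pvMinStep (key : String → Int) : Option String → String → Option String
  | none, x => some x
  | some m, x => if key x < key m then some x else some m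

lemma min?_eq_foldl (key : String → Int) (ms : List String) :
    PySem.List.min? ms key = ms.foldl (pvMinStep key) none := by
  simp only [PySem.List.min?]
  congr 1
  funext acc x
  cases acc <;> rfl

lemma minkeep (key : String → Int) (m : String) :
    ∀ (ms : List String), (∀ z ∈ ms, ¬ key z < key m) →
    ms.foldl (pvMinStep key) (some m) = some m := by
  intro ms
  induction ms with
  | nil => intro _; rfl
  | cons y ys ih =>
    intro h
    have hy : ¬ key y < key m := h y (by simp)
    simp only [List.foldl_cons, pvMinStep, if_neg hy]
    exact ih (fun z hz => h z (by simp [hz]))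

lemma minaux (key : String → Int) (e : Int) (t : String) :
    ∀ (ms : List String) (m : String), (∀ z ∈ ms, e ≤ key z) →
    ms.find? (fun i => e == key i) = some t → e < key m →
    ms.foldl (pvMinStep key) (some m) = some t := by
  intro ms
  induction ms with
  | nil => intro m _ hfind _; simp at hfind
  | cons y ys ih =>
    intro m hle hfind hm
    by_cases hy : e = key y
    · have hty : y = t := by
        rw [List.find?_cons_of_pos (by simpa using hy)] at hfind
        simpa using hfind
      have hstep : key y < key m := by rw [← hy]; exact hm
      simp only [List.foldl_cons, pvMinStep, if_pos hstep]
      rw [hty]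
      exact minkeep key t ys (fun z hz => by
        have := hle z (by simp [hz])
        rw [← hty, ← hy]; omega)
    · have hfind' : ys.find? (fun i => e == key i) = some t := by
        rwa [List.find?_cons_of_neg (by simpa using hy)] at hfind
      have hyge : e < key y := lt_of_le_of_ne (hle y (by simp)) hy
      have hle' : ∀ z ∈ ys, e ≤ key z := fun z hz => hle z (by simp [hz])
      simp only [List.foldl_cons, pvMinStep]
      by_cases hcmp : key y < key m
      · rw [if_pos hcmp]; exact ih y hle' hfind' hyge
      · rw [if_neg hcmp]; exact ih m hle' hfind' hm

lemma minfind (key : String → Int) (e : Int) (t : String) :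
    ∀ (ms : List String), (∀ z ∈ ms, e ≤ key z) →
    ms.find? (fun i => e == key i) = some t →
    PySem.List.min? ms key = some t := by
  intro ms
  cases ms with
  | nil => intro _ h; simp at h
  | cons y ys =>
    intro hle hfind
    rw [min?_eq_foldl]
    rw [List.foldl_cons]
    show List.foldl _ (some y) ys = some t
    by_cases hy : e = key y
    · have hty : y = t := by
        rw [List.find?_cons_of_pos (by simpa using hy)] at hfind
        simpa using hfind
      rw [hty]
      exact minkeep key t ys (fun z hz => by
        have := hle z (by simp [hz])
        rw [← hty, ← hy]; omega)
    · have hfind' : ys.find? (fun i => e == key i) = some t := by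
        rwa [List.find?_cons_of_neg (by simpa using hy)] at hfind
      exact minaux key e t ys y (fun z hz => hle z (by simp [hz])) hfind'
        (lt_of_le_of_ne (hle y (by simp)) hy)

lemma first_eq_musait_find (izinli : List String) (d : PySem.Dict String Int) (e : Int)
    (K : List String) :
    pvFirst izinli d e K
      = (K.filter (fun t => !izinli.contains t)).find? (fun i => e == d.getD i 0) := by
  rw [List.find?_filter]
  unfold pvFirst
  congr 1
  funext a
  cases h : (e == d.getD a 0)
  · simp_all
  · simp_all

lemma gsplit (izinli : List String) (e : Int) (K : List String) :
    ∀ (cs : List String) (d : PySem.Dict String Int), d.keys = K →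
    (∀ t ∈ K.filter (fun t => !izinli.contains t), e ≤ d.getD t 0) →
    pvG (K.filter (fun t => !izinli.contains t)) cs d =
      (pvAPass izinli e K cs d).1 ++
        pvG (K.filter (fun t => !izinli.contains t)) (pvAPass izinli e K cs d).2.1
          (pvAPass izinli e K cs d).2.2 := by
  intro cs
  induction cs with
  | nil => intro d _ _; simp [pvAPass]
  | cons c cs ih =>
    intro d hK hlow
    cases hf : pvFirst izinli d e K with
    | none => simp [pvAPass, hf]
    | some t =>
      obtain ⟨htK, htiz, hte⟩ := first_mem_getD izinli d e K t hf
      have hmin : PySem.List.min? (K.filter (fun t => !izinli.contains t))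
          (fun i => d.getD i 0) = some t := by
        refine minfind _ e t _ hlow ?_
        rw [← first_eq_musait_find]
        exact hf
      have hmod : (d.modify t 0 (· + 1)).keys = K := by
        rw [keys_modify_mem d t (hK ▸ htK)]; exact hK
      have hstep : pvAPass izinli e K (c :: cs) d =
          ((c, t) :: (pvAPass izinli e K cs (d.modify t 0 (· + 1))).1,
            (pvAPass izinli e K cs (d.modify t 0 (· + 1))).2) := by
        simp [pvAPass, hf]
      have hlow' : ∀ z ∈ K.filter (fun t => !izinli.contains t),
          e ≤ (d.modify t 0 (· + 1)).getD z 0 := by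
        intro z hz
        rw [PySem.Dict.getD_modify d t z 0 (· + 1)]
        by_cases hzt : z = t
        · rw [if_pos hzt, hte]; omega
        · rw [if_neg hzt]; exact hlow z hz
      rw [hstep]
      show pvG _ (c :: cs) d = ((c, t) :: (pvAPass izinli e K cs (d.modify t 0 (· + 1))).1)
        ++ pvG _ (pvAPass izinli e K cs (d.modify t 0 (· + 1))).2.1
             (pvAPass izinli e K cs (d.modify t 0 (· + 1))).2.2
      rw [pvG, hmin, List.cons_append]
      exact congrArg _ (ih (d.modify t 0 (· + 1)) hmod hlow')

lemma pass_eq (izinli : List String) (e : Int) (K : List String) :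
    ∀ (ds : List String) (atama : List String) (gorev : PySem.Dict String String)
      (sayisi : Int) (d : PySem.Dict String Int), ds.Nodup → d.keys = K →
    pvPassA izinli e ds (atama, gorev, sayisi, d) =
      (atama ++ ((pvAPass izinli e K (ds.filter fun c => !atama.contains c) d).1.map Prod.fst),
       (pvAPass izinli e K (ds.filter fun c => !atama.contains c) d).1.foldl
         (fun g p => g.insert p.1 p.2) gorev,
       sayisi - (pvAPass izinli e K (ds.filter fun c => !atama.contains c) d).1.length,
       (pvAPass izinli e K (ds.filter fun c => !atama.contains c) d).2.2) := by
  intro ds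
  induction ds with
  | nil => intro atama gorev sayisi d _ _; simp [pvPassA, pvAPass]
  | cons ders ds ih =>
    intro atama gorev sayisi d hnd hK
    have hnd' : ds.Nodup := hnd.of_cons
    have hders : ders ∉ ds := by
      have := List.nodup_cons.mp hnd
      exact this.1
    by_cases hmem : ders ∈ atama
    · have hfilter : (ders :: ds).filter (fun c => !atama.contains c)
          = ds.filter (fun c => !atama.contains c) := by
        simp [List.filter_cons, hmem]
      rw [hfilter]
      show pvPassA izinli e ds (pvInnerA izinli e ders d.keys atama gorev sayisi d) = _
      rw [innerA_of_mem izinli e ders d.keys atama gorev sayisi d hmem]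
      exact ih atama gorev sayisi d hnd' hK
    · have hfilter : (ders :: ds).filter (fun c => !atama.contains c)
          = ders :: ds.filter (fun c => !atama.contains c) := by
        simp [List.filter_cons, hmem]
      rw [hfilter]
      show pvPassA izinli e ds (pvInnerA izinli e ders d.keys atama gorev sayisi d) = _
      rw [innerA_char izinli e ders d.keys atama gorev sayisi d hmem, hK]
      cases hf : pvFirst izinli d e K with
      | none =>
        rw [apass_none izinli e K _ d hf]
        have h2 : pvAPass izinli e K (ds.filter fun c => !atama.contains c) d = ([], ds.filter (fun c => !atama.contains c), d) :=
          apass_none izinli e K _ d hf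
        have := ih atama gorev sayisi d hnd' hK
        rw [h2] at this
        simpa using this
      | some t =>
        obtain ⟨htK, -, -⟩ := first_mem_getD izinli d e K t hf
        have hmod : (d.modify t 0 (· + 1)).keys = K := by
          rw [keys_modify_mem d t (hK ▸ htK)]; exact hK
        have hstep : pvAPass izinli e K (ders :: ds.filter fun c => !atama.contains c) d =
            ((ders, t) :: (pvAPass izinli e K (ds.filter fun c => !atama.contains c) (d.modify t 0 (· + 1))).1,
              (pvAPass izinli e K (ds.filter fun c => !atama.contains c) (d.modify t 0 (· + 1))).2) := by
          simp [pvAPass, hf]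
        rw [hstep]
        have hcongr : ds.filter (fun c => !(atama ++ [ders]).contains c)
            = ds.filter (fun c => !atama.contains c) := by
          apply List.filter_congr
          intro c hc
          have : ders ≠ c := fun h => hders (h ▸ hc)
          simp [List.contains_append, this.symm]
        have := ih (atama ++ [ders]) (gorev.insert ders t) (sayisi - 1) (d.modify t 0 (· + 1)) hnd' hmod
        rw [hcongr] at this
        rw [this]
        refine Prod.ext ?_ (Prod.ext ?_ (Prod.ext ?_ ?_)) <;> simp
        · omega

lemma while_eq (izinli dersler : List String) (K : List String) (hnd : dersler.Nodup) :
    ∀ (f : Nat) (atama : List String) (gorev : PySem.Dict String String)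
      (sayisi : Int) (d : PySem.Dict String Int) (e : Int),
    d.keys = K →
    gorev.keys = atama →
    sayisi = ((dersler.filter fun c => !atama.contains c).length : Int) →
    (∀ t ∈ K.filter (fun t => !izinli.contains t), e ≤ d.getD t 0) →
    (∀ t ∈ K.filter (fun t => !izinli.contains t),
        d.getD t 0 + ((dersler.filter fun c => !atama.contains c).length : Int) < e + (f : Int)) →
    ((dersler.filter fun c => !atama.contains c) ≠ [] →
        (K.filter (fun t => !izinli.contains t)) ≠ []) →
    (pvWhileA izinli dersler f e (atama, gorev, sayisi, d)).items
      = gorev.items ++ pvG (K.filter (fun t => !izinli.contains t))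
          (dersler.filter fun c => !atama.contains c) d := by
  intro f
  induction f with
  | zero =>
    intro atama gorev sayisi d e hK hgk hsay hlow hfuel havail
    by_cases hcs : (dersler.filter fun c => !atama.contains c) = []
    · rw [hcs] at hsay
      rw [hcs]
      have hs0 : sayisi = 0 := by simpa using hsay
      simp [pvWhileA, hs0, pvG]
    · exfalso
      obtain ⟨t, ht⟩ := List.exists_mem_of_ne_nil _ (havail hcs)
      have h1 := hlow t ht
      have h2 := hfuel t ht
      have h3 : 0 < (dersler.filter fun c => !atama.contains c).length := List.length_pos_iff.mpr hcs
      push_cast at h2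
      omega
  | succ f ihf =>
    intro atama gorev sayisi d e hK hgk hsay hlow hfuel havail
    by_cases hcs : (dersler.filter fun c => !atama.contains c) = []
    · rw [hcs] at hsay
      rw [hcs]
      have hs0 : sayisi = 0 := by simpa using hsay
      simp [pvWhileA, hs0, pvG]
    · have hsne : sayisi ≠ 0 := by
        have : 0 < (dersler.filter fun c => !atama.contains c).length := List.length_pos_iff.mpr hcs
        omega
      have hunf : pvWhileA izinli dersler (f + 1) e (atama, gorev, sayisi, d)
          = pvWhileA izinli dersler f (e + 1) (pvPassA izinli e dersler (atama, gorev, sayisi, d)) := by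
        simp [pvWhileA, hsne]
      rw [hunf, pass_eq izinli e K dersler atama gorev sayisi d hnd hK]
      -- abbreviations
      obtain ⟨p1, p2, p3, p4, p5⟩ :=
        apass_props izinli e K (dersler.filter fun c => !atama.contains c) d hK
      set cs := dersler.filter (fun c => !atama.contains c) with hcsdef
      rcases hPeq : pvAPass izinli e K cs d with ⟨out, rem, d'⟩
      rw [hPeq] at p1 p2 p3 p4 p5
      dsimp only at p1 p2 p3 p4 p5 ⊢
      have hcsn : cs.Nodup := hnd.filter _
      have hofnodup : (out.map Prod.fst).Nodup := (List.nodup_append.mp (p1 ▸ hcsn)).1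
      have hpair := (List.nodup_append.mp (p1 ▸ hcsn)).2.2
      have hdisj : ∀ a ∈ out.map Prod.fst, a ∉ rem := fun a ha hr => (hpair a ha a hr) rfl
      have hofcs : ∀ a ∈ out.map Prod.fst, a ∈ cs := by
        intro a ha
        rw [← p1]; exact List.mem_append_left _ ha
      have hremcs : ∀ a ∈ rem, a ∈ cs := by
        intro a ha
        rw [← p1]; exact List.mem_append_right _ ha
      have hcsprop : ∀ a ∈ cs, a ∈ dersler ∧ a ∉ atama := by
        intro a ha
        have := List.mem_filter.mp ha
        simpa using this
      -- (a) the courses still unassigned after the pass are exactly `rem`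
      have hnewcs : dersler.filter (fun c => !(atama ++ out.map Prod.fst).contains c) = rem := by
        have h1 : dersler.filter (fun c => !(atama ++ out.map Prod.fst).contains c)
            = dersler.filter (fun c => (!(out.map Prod.fst).contains c) && !atama.contains c) := by
          apply List.filter_congr
          intro c _
          rw [List.contains_append, Bool.not_or, Bool.and_comm]
        rw [h1, ← List.filter_filter, ← hcsdef, ← p1, List.filter_append]
        have h2 : (out.map Prod.fst).filter (fun c => !(out.map Prod.fst).contains c) = [] := by
          rw [List.filter_eq_nil_iff]
          intro a ha
          simp [ha]
        have h3 : rem.filter (fun c => !(out.map Prod.fst).contains c) = rem := by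
          rw [List.filter_eq_self]
          intro a ha
          have : a ∉ out.map Prod.fst := fun h => hdisj a h ha
          simp [this]
        rw [h2, h3, List.nil_append]
      -- (b) gorev after the pass
      have hfresh : ∀ p ∈ out, gorev.contains p.1 = false := by
        intro p hp
        have hin : p.1 ∈ cs := hofcs _ (List.mem_map_of_mem hp)
        have : p.1 ∉ atama := (hcsprop _ hin).2
        rw [← hgk] at this
        cases hcon : gorev.contains p.1
        · rfl
        · exact absurd ((PySem.Dict.contains_iff_mem_keys gorev p.1).mp hcon) this
      have hitems : (out.foldl (fun g p => g.insert p.1 p.2) gorev).items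
          = gorev.items ++ out := by
        have := PySem.Dict.items_foldl_insert_fresh out Prod.fst Prod.snd gorev hfresh hofnodup
        simpa using this
      have hkeys : (out.foldl (fun g p => g.insert p.1 p.2) gorev).keys
          = atama ++ out.map Prod.fst := by
        have h0 : (out.foldl (fun g p => g.insert p.1 p.2) gorev).keys
            = PySem.Set.update gorev.keys (out.map Prod.fst) :=
          PySem.Dict.keys_foldl_insert_key out Prod.fst (fun _ p => p.2) gorev
        rw [h0, hgk]
        exact PySem.Set.update_eq_append_of_disjoint atama (out.map Prod.fst) hofnodup
          (fun x hx => (hcsprop _ (hofcs _ hx)).2)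
      have hlen : out.length + rem.length = cs.length := by
        have := congrArg List.length p1
        simpa using this
      have hGs : pvG (K.filter (fun t => !izinli.contains t)) cs d
          = out ++ pvG (K.filter (fun t => !izinli.contains t)) rem d' := by
        have := gsplit izinli e K cs d hK hlow
        rw [hPeq] at this
        exact this
      by_cases hrem : rem = []
      · -- the pass finished everything: the while-loop exits on sayisi = 0
        have hs0 : sayisi - (out.length : Int) = 0 := by
          rw [hrem] at hlen
          simp at hlen
          rw [hsay]
          omega
        rw [hs0]
        have : pvWhileA izinli dersler f (e + 1)
            (atama ++ out.map Prod.fst, out.foldl (fun g p => g.insert p.1 p.2) gorev, 0, d')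
            = out.foldl (fun g p => g.insert p.1 p.2) gorev := by
          cases f <;> simp [pvWhileA]
        rw [this, hitems, hGs, hrem]
        simp [pvG]
      · -- more courses remain: apply the induction hypothesis at level e + 1
        have hK' : d'.keys = K := p2
        have hlow' : ∀ t ∈ K.filter (fun t => !izinli.contains t), e + 1 ≤ d'.getD t 0 := by
          intro t ht
          have hnone := p4 hrem
          unfold pvFirst at hnone
          have htK2 : t ∈ K := List.mem_of_mem_filter ht
          have hpred := List.find?_eq_none.mp hnone t htK2
          have htiz : (!izinli.contains t) = true := (List.mem_filter.mp ht).2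
          have hne : d'.getD t 0 ≠ e := by
            intro hcontra
            exact hpred (by rw [hcontra]; simpa using htiz)
          rcases p3 t with h | h
          · have h2 := hlow t ht
            rw [h] at hne
            rw [h]
            omega
          · rcases h with ⟨-, h2⟩
            omega
        have hfuel' : ∀ t ∈ K.filter (fun t => !izinli.contains t),
            d'.getD t 0 + ((dersler.filter fun c =>
              !(atama ++ out.map Prod.fst).contains c).length : Int) < (e + 1) + (f : Int) := by
          intro t ht
          rw [hnewcs]
          have hft := hfuel t ht
          rcases p3 t with h | h
          · rw [h]
            have : rem.length ≤ cs.length := by omega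
            push_cast at hft ⊢
            omega
          · rw [h.2]
            by_cases hout0 : out = []
            · exfalso
              have hd := p5 hout0
              rw [hd] at h
              omega
            · have hpos : 0 < out.length := List.length_pos_iff.mpr hout0
              rw [h.1] at hft
              push_cast at hft ⊢
              omega
        have havail' : (dersler.filter fun c => !(atama ++ out.map Prod.fst).contains c) ≠ [] →
            (K.filter (fun t => !izinli.contains t)) ≠ [] := fun _ => havail hcs
        have hsay' : sayisi - (out.length : Int)
            = ((dersler.filter fun c => !(atama ++ out.map Prod.fst).contains c).length : Int) := by
          rw [hnewcs, hsay]
          omega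
        have hmain := ihf (atama ++ out.map Prod.fst)
          (out.foldl (fun g p => g.insert p.1 p.2) gorev)
          (sayisi - (out.length : Int)) d' (e + 1) hK' hkeys hsay' hlow' hfuel' havail'
        rw [hmain, hnewcs, hitems, hGs, List.append_assoc]

lemma loopB_eq (musait : List String) :
    ∀ (cs : List String) (d : PySem.Dict String Int) (atama : PySem.Dict String String),
    cs.Nodup → (∀ c ∈ cs, atama.contains c = false) →
    (pvLoopB musait cs d atama).items = atama.items ++ pvG musait cs d := by
  intro cs
  induction cs with
  | nil => intro d atama _ _; simp [pvLoopB, pvG]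
  | cons c cs ih =>
    intro d atama hnd hfresh
    cases hmin : PySem.List.min? musait (fun t => d.getD t 0) with
    | none => simp [pvLoopB, pvG, hmin]
    | some t =>
      have hfresh' : ∀ c' ∈ cs, (atama.insert c t).contains c' = false := by
        intro c' hc'
        have hne : c' ≠ c := by
          rintro rfl
          exact (List.nodup_cons.mp hnd).1 hc'
        rw [PySem.Dict.contains_insert]
        simp [hne, hfresh c' (by simp [hc'])]
      have := ih (d.modify t 0 (· + 1)) (atama.insert c t) (List.nodup_cons.mp hnd).2 hfresh'
      simp only [pvLoopB, hmin, pvG, this,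
        PySem.Dict.items_insert_of_not_contains atama t (hfresh c (by simp))]
      simp

lemma foldmin_le_init (g : String → Int) :
    ∀ (ks : List String) (init : Int),
    ks.foldl (fun e k => if g k < e then g k else e) init ≤ init := by
  intro ks
  induction ks with
  | nil => intro init; simp
  | cons k ks ih =>
    intro init
    simp only [List.foldl_cons]
    by_cases h : g k < init
    · rw [if_pos h]; have := ih (g k); omega
    · rw [if_neg h]; exact ih init

lemma foldmin_le_mem (g : String → Int) :
    ∀ (ks : List String) (init : Int) (k : String), k ∈ ks →
    ks.foldl (fun e k => if g k < e then g k else e) init ≤ g k := by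
  intro ks
  induction ks with
  | nil => intro _ k h; simp at h
  | cons k0 ks ih =>
    intro init k hk
    simp only [List.foldl_cons]
    rcases List.mem_cons.mp hk with rfl | hk'
    · by_cases h : g k < init
      · rw [if_pos h]; have := foldmin_le_init g ks (g k); omega
      · rw [if_neg h]
        have := foldmin_le_init g ks init
        omega
    · exact ih _ k hk'

lemma foldmax_ge_init (g : String → Int) :
    ∀ (ks : List String) (init : Int),
    init ≤ ks.foldl (fun e k => if e < g k then g k else e) init := by
  intro ks
  induction ks with
  | nil => intro init; simp
  | cons k ks ih =>
    intro init
    simp only [List.foldl_cons]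
    by_cases h : init < g k
    · rw [if_pos h]; have := ih (g k); omega
    · rw [if_neg h]; exact ih init

lemma foldmax_ge_mem (g : String → Int) :
    ∀ (ks : List String) (init : Int) (k : String), k ∈ ks →
    g k ≤ ks.foldl (fun e k => if e < g k then g k else e) init := by
  intro ks
  induction ks with
  | nil => intro _ k h; simp at h
  | cons k0 ks ih =>
    intro init k hk
    simp only [List.foldl_cons]
    rcases List.mem_cons.mp hk with rfl | hk'
    · by_cases h : init < g k
      · rw [if_pos h]; have := foldmax_ge_init g ks (g k); omega
      · rw [if_neg h]
        have := foldmax_ge_init g ks init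
        omega
    · exact ih _ k hk'

lemma keys_ofList_eq (ogretmen : List (String × Int)) :
    (PySem.Dict.ofList ogretmen).keys = PySem.Set.ofList (ogretmen.map Prod.fst) := by
  have := PySem.Dict.keys_foldl_insert_key ogretmen Prod.fst (fun _ q => q.2) PySem.Dict.empty
  simpa [PySem.Set.update_empty] using this

theorem main_eq (izinli dersler : List String) (ogretmen : List (String × Int))
    (hnd : dersler.Nodup)
    (hav : dersler = [] ∨ ∃ p ∈ ogretmen, ¬ p.1 ∈ izinli) :
    sinav_sistemi izinli dersler ogretmen = sinav_sistemi_alt izinli dersler ogretmen := by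
  unfold sinav_sistemi sinav_sistemi_alt
  set d0 := PySem.Dict.ofList ogretmen with hd0
  set K := d0.keys with hKdef
  set musait := K.filter (fun t => !izinli.contains t) with hmdef
  set e0 := K.foldl (fun e k => if d0.getD k 0 < e then d0.getD k 0 else e) (100 : Int) with he0
  set maxv := K.foldl (fun e k => if e < d0.getD k 0 then d0.getD k 0 else e) e0 with hmaxv
  have he0low : ∀ t ∈ musait, e0 ≤ d0.getD t 0 := fun t ht =>
    foldmin_le_mem _ K 100 t (List.mem_of_mem_filter ht)
  have hmax0 : e0 ≤ maxv := foldmax_ge_init _ K e0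
  have hmaxmem : ∀ t ∈ K, d0.getD t 0 ≤ maxv := fun t ht =>
    foldmax_ge_mem _ K e0 t ht
  have hfilter0 : dersler.filter (fun c => !(([] : List String).contains c)) = dersler := by
    simp
  have hA := while_eq izinli dersler K hnd ((maxv - e0).toNat + dersler.length + 2)
    [] PySem.Dict.empty
    (dersler.length : Int) d0 e0 rfl (by simp [PySem.Dict.keys, PySem.Dict.empty])
    (by rw [hfilter0]) he0low
    (by
      intro t ht
      rw [hfilter0]
      have h1 := hmaxmem t (List.mem_of_mem_filter ht)
      have h2 : ((maxv - e0).toNat : Int) = maxv - e0 := Int.toNat_of_nonneg (by omega)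
      push_cast
      omega)
    (by
      intro hne
      rw [hfilter0] at hne
      rcases hav with rfl | ⟨p, hp, hpiz⟩
      · exact absurd rfl hne
      · have hk : p.1 ∈ K := by
          rw [hKdef, hd0, keys_ofList_eq]
          rw [PySem.Set.mem_ofList]
          exact List.mem_map_of_mem hp
        have : p.1 ∈ musait := by
          rw [hmdef]
          rw [List.mem_filter]
          exact ⟨hk, by simpa using hpiz⟩
        exact List.ne_nil_of_mem this)
  rw [hfilter0] at hA
  rw [hA, loopB_eq musait dersler d0 PySem.Dict.empty hnd
    (fun c _ => by simp [PySem.Dict.contains_empty])]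

-- ===== VERDICT (by name: the statement is the Claim_ definition above) =====
theorem sinav_sistemi_spec : Claim_equal_sinav_sistemi := by
  intro izinli_ogretmenler dersler ogretmen _ hpre
  obtain ⟨hnd, hav⟩ := hpre
  unfold Spec_sinav_sistemi
  exact main_eq izinli_ogretmenler dersler ogretmen hnd hav
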